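-- pv_equiv track=rewrite | github.com/ajeetraina/mcp-portal | pr-preview/pr-34/scripts/update_mcp_servers.py | is_new_server
-- ===== SOURCE A (Python) =====
-- def is_new_server(server, existing_servers):
--     """Check if the server is new and not already in the list."""
--     for existing in existing_servers:
--         # Check by GitHub URL (most reliable identifier)
--         if existing.get('github_url') == server['github_url']:
--             return False
--
--         # Check by Docker image
--         if existing.get('docker_image') == server['docker_image']:
--             return False
--
--         # Check by name similarity
--         if existing.get('name', '').lower() == server['name'].lower():
--             return False
--
--     return True
-- ===== SOURCE B (Python) =====
-- def is_new_server(server, existing_servers):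
--     """Check if the server is new and not already in the list."""
--     if not existing_servers:
--         return True
--     # field-major: one full pass over the list per identifying field
--     for key, norm in (('github_url', None), ('docker_image', None), ('name', str.lower)):
--         if norm is None:
--             target = server[key]
--             if any(e.get(key) == target for e in existing_servers):
--                 return False
--         else:
--             target = norm(server[key])
--             if any(norm(e.get(key, '')) == target for e in existing_servers):
--                 return False
--     return True
-- ===== Notes on version B (the rewrite author's own statement) =====
-- stated objective: alternative
-- what changed: Transposes A's element-major scan (three inline field checks with early return per existing server) into a table-driven field-major algorithm: an outer loop over a spec table of identifying fields, each doing one full any() pass over existing_servers; Pre_ excludes exactly the inputs where A raises KeyError on a missing server key.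
import Mathlib
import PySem

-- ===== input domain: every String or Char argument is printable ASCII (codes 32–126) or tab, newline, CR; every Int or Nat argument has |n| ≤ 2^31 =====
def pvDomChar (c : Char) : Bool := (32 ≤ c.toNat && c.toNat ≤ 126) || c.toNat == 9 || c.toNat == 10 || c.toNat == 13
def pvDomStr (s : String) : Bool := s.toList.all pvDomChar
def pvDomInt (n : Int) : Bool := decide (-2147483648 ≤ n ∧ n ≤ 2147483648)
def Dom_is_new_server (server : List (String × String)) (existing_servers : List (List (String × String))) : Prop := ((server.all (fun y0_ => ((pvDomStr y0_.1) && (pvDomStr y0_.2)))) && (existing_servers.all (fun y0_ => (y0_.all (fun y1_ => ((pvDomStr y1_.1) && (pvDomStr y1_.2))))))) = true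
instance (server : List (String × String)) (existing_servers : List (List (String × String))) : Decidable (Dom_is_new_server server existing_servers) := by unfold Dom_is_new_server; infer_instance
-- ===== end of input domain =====

-- B transposes A's element-major scan (three inline checks per existing server, early
-- return inside one loop) into a table-driven field-major algorithm: for each identifying
-- field in turn, one full pass over existing_servers; same O(n) cost, different traversal.


-- shared dict primitives: d.get(k) and d.get(k, dflt) on an association list (first match)
def pyGet (d : List (String × String)) (k : String) : Option String :=
  (d.find? (fun p => p.1 == k)).map (·.2)

def pyGetD (d : List (String × String)) (k : String) (dflt : String) : String :=
  (pyGet d k).getD dflt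

-- ===== PORT A =====
-- the for-loop of A: early 'return False' on any of the three matches, else continue.
-- server['github_url'] etc. are ported as pyGet/pyGetD; Pre_ guarantees the subscripted
-- keys are present wherever the Python actually evaluates them, so this is exact on Pre_.
def aLoop (server : List (String × String)) : List (List (String × String)) → Bool
  | [] => true
  | ex :: rest =>
    if pyGet ex "github_url" == pyGet server "github_url" then false
    else if pyGet ex "docker_image" == pyGet server "docker_image" then false
    else if PySem.Str.lower (pyGetD ex "name" "") == PySem.Str.lower (pyGetD server "name" "") then false
    else aLoop server rest

def is_new_server (server : List (String × String)) (existing_servers : List (List (String × String))) : Bool :=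
  aLoop server existing_servers

-- ===== PORT B =====
-- the inner any(...) of B: one full pass over existing_servers for ONE field
-- (lower = whether this field is compared case-insensitively, with default '')
def bScan (k : String) (lower : Bool) (target : Option String) : List (List (String × String)) → Bool
  | [] => false
  | ex :: rest =>
    (if lower then some (PySem.Str.lower (pyGetD ex k "")) == target
     else pyGet ex k == target) || bScan k lower target rest

-- the outer for-loop of B over the spec table (key, lower?), early 'return False'
def bPasses (server : List (String × String)) (existing_servers : List (List (String × String))) :
    List (String × Bool) → Bool
  | [] => true
  | (k, lower) :: specs =>
    let target := if lower then (pyGet server k).map PySem.Str.lower else pyGet server k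
    if bScan k lower target existing_servers then false
    else bPasses server existing_servers specs

def is_new_server_alt (server : List (String × String)) (existing_servers : List (List (String × String))) : Bool :=
  if existing_servers.isEmpty then true
  else bPasses server existing_servers [("github_url", false), ("docker_image", false), ("name", true)]

-- ===== PRECONDITION & SPEC =====
-- Pre_ is exactly the set of inputs where Python A returns: A raises KeyError iff
-- existing_servers is nonempty and a key of server is missing at the point the loop's
-- first iteration subscripts it ('github_url' always; 'docker_image' unless the head
-- matched by URL; 'name' unless the head matched by URL or Docker image).
def Pre_is_new_server (server : List (String × String)) (existing_servers : List (List (String × String))) : Prop :=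
  existing_servers = [] ∨
  ("github_url" ∈ server.map Prod.fst ∧
    (pyGet (existing_servers.headD []) "github_url" = pyGet server "github_url" ∨
      ("docker_image" ∈ server.map Prod.fst ∧
        (pyGet (existing_servers.headD []) "docker_image" = pyGet server "docker_image" ∨
          "name" ∈ server.map Prod.fst))))

instance (server : List (String × String)) (existing_servers : List (List (String × String))) : Decidable (Pre_is_new_server server existing_servers) := by unfold Pre_is_new_server; infer_instance

def pvWitness_is_new_server : (List (String × String)) × (List (List (String × String))) :=
  ([("github_url", "u"), ("docker_image", "d"), ("name", "n")], [[("name", "m")]])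

def Spec_is_new_server (server : List (String × String)) (existing_servers : List (List (String × String))) (out : Bool) : Prop := out = is_new_server_alt server existing_servers
instance (server : List (String × String)) (existing_servers : List (List (String × String))) (out : Bool) : Decidable (Spec_is_new_server server existing_servers out) := by unfold Spec_is_new_server; infer_instance

-- ===== CLAIM (what is proved, stated in full; the proofs are below) =====
def Claim_equal_is_new_server : Prop := ∀ (server : List (String × String)) (existing_servers : List (List (String × String))), Dom_is_new_server server existing_servers → Pre_is_new_server server existing_servers → Spec_is_new_server server existing_servers (is_new_server server existing_servers)

-- ===== LEMMAS AND PROOFS =====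

theorem any_congr_mem {α : Type} (l : List α) (p q : α → Bool) (h : ∀ x ∈ l, p x = q x) :
    l.any p = l.any q := by
  induction l with
  | nil => rfl
  | cons a t ih =>
    simp only [List.any_cons, h a (by simp), ih (fun x hx => h x (by simp [hx]))]

-- per-field match predicates
def mUrl (server ex : List (String × String)) : Bool :=
  pyGet ex "github_url" == pyGet server "github_url"
def mDoc (server ex : List (String × String)) : Bool :=
  pyGet ex "docker_image" == pyGet server "docker_image"
def mNameA (server ex : List (String × String)) : Bool :=
  PySem.Str.lower (pyGetD ex "name" "") == PySem.Str.lower (pyGetD server "name" "")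

theorem aLoop_eq_not_any (server : List (String × String)) (l : List (List (String × String))) :
    aLoop server l = !(l.any (fun ex => mUrl server ex || mDoc server ex || mNameA server ex)) := by
  induction l with
  | nil => rfl
  | cons ex rest ih =>
    simp only [aLoop, List.any_cons, mUrl, mDoc, mNameA]
    split_ifs with h1 h2 h3
    · simp [h1]
    · simp [h2]
    · simp [h3]
    · rw [ih]
      simp [mUrl, mDoc, mNameA, Bool.eq_false_iff.mpr h1, Bool.eq_false_iff.mpr h2,
        Bool.eq_false_iff.mpr h3]

theorem bScan_eq_any (k : String) (lower : Bool) (target : Option String)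
    (l : List (List (String × String))) :
    bScan k lower target l =
      l.any (fun ex => if lower then some (PySem.Str.lower (pyGetD ex k "")) == target
                       else pyGet ex k == target) := by
  induction l with
  | nil => rfl
  | cons ex rest ih => simp [bScan, ih]

theorem pyGet_of_mem (d : List (String × String)) (k : String) (h : k ∈ d.map Prod.fst) :
    ∃ v, pyGet d k = some v := by
  induction d with
  | nil => simp at h
  | cons p rest ih =>
    by_cases hk : p.1 = k
    · exact ⟨p.2, by simp [pyGet, hk]⟩
    · have h' : k ∈ rest.map Prod.fst := by
        simp at h; rcases h with h | h
        · exact absurd h.symm hk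
        · simpa using h
      obtain ⟨v, hv⟩ := ih h'
      exact ⟨v, by simpa [pyGet, hk] using hv⟩

theorem alt_eq (server : List (String × String)) (e : List (String × String))
    (t : List (List (String × String))) :
    is_new_server_alt server (e :: t) =
      (if (e :: t).any (mUrl server) = true then false
       else if (e :: t).any (mDoc server) = true then false
       else if ((e :: t).any (fun ex =>
          some (PySem.Str.lower (pyGetD ex "name" "")) == Option.map PySem.Str.lower (pyGet server "name"))) = true
            then false else true) := by
  simp only [is_new_server_alt, List.isEmpty_cons, bPasses, bScan_eq_any,
    Bool.false_eq_true, if_false, if_true]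
  rfl

-- ===== VERDICT (by name: the statement is the Claim_ definition above) =====
theorem is_new_server_spec : Claim_equal_is_new_server := by
  intro server existing _ hpre
  unfold Spec_is_new_server is_new_server
  cases existing with
  | nil => rfl
  | cons e t =>
    rcases hpre with h | ⟨_, hpre⟩
    · exact absurd h (by simp)
    rw [aLoop_eq_not_any, alt_eq]
    by_cases hU : (e :: t).any (mUrl server) = true
    · rw [if_pos hU]
      rcases List.any_eq_true.mp hU with ⟨x, hx, hx2⟩
      have h3 : (e :: t).any (fun ex => mUrl server ex || mDoc server ex || mNameA server ex) = true :=
        List.any_eq_true.mpr ⟨x, hx, by simp [hx2]⟩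
      simp [h3]
    · rw [if_neg hU]
      by_cases hD : (e :: t).any (mDoc server) = true
      · rw [if_pos hD]
        rcases List.any_eq_true.mp hD with ⟨x, hx, hx2⟩
        have h3 : (e :: t).any (fun ex => mUrl server ex || mDoc server ex || mNameA server ex) = true :=
          List.any_eq_true.mpr ⟨x, hx, by simp [hx2]⟩
        simp [h3]
      · rw [if_neg hD]
        have hUf := List.any_eq_false.mp (Bool.eq_false_iff.mpr hU)
        have hDf := List.any_eq_false.mp (Bool.eq_false_iff.mpr hD)
        -- neither url nor docker matches anywhere; Pre_ forces 'name' ∈ server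
        have hname : "name" ∈ server.map Prod.fst := by
          have hUe : ¬ (pyGet e "github_url" = pyGet server "github_url") := by
            have := hUf e (by simp); simpa [mUrl] using this
          have hDe : ¬ (pyGet e "docker_image" = pyGet server "docker_image") := by
            have := hDf e (by simp); simpa [mDoc] using this
          rcases hpre with h | ⟨_, h⟩
          · exact absurd (by simpa using h) hUe
          rcases h with h | h
          · exact absurd (by simpa using h) hDe
          · exact h
        obtain ⟨sv, hsv⟩ := pyGet_of_mem server "name" hname
        have hgd : pyGetD server "name" "" = sv := by simp [pyGetD, hsv]
        have hcong : ∀ x ∈ e :: t,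
            (mUrl server x || mDoc server x || mNameA server x) =
              (some (PySem.Str.lower (pyGetD x "name" "")) == Option.map PySem.Str.lower (pyGet server "name")) := by
          intro x hxmem
          have h1 : mUrl server x = false := Bool.eq_false_iff.mpr (hUf x hxmem)
          have h2 : mDoc server x = false := Bool.eq_false_iff.mpr (hDf x hxmem)
          simp [h1, h2, mNameA, hsv, hgd]
        rw [any_congr_mem _ _ _ hcong]
        cases hb : ((e :: t).any fun ex =>
            some (PySem.Str.lower (pyGetD ex "name" "")) == Option.map PySem.Str.lower (pyGet server "name")) <;>
          simp
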